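-- pv_equiv track=rewrite | github.com/dstanziola/inventarioVentasApp | src/services/report_service.py | _get_next_period
-- ===== SOURCE A (Python) =====
-- def _get_next_period(last_period: str, increment: int, period_type: str) -> str:
--     """Calcula el siguiente período basado en el tipo"""
--     if period_type == 'month':
--         # Formato: YYYY-MM
--         year, month = map(int, last_period.split('-'))
--         for _ in range(increment):
--             month += 1
--             if month > 12:
--                 month = 1
--                 year += 1
--         return f"{year}-{month:02d}"
--
--     # Para otros tipos, implementación básica
--     return f"{last_period}+{increment}"
-- ===== SOURCE B (Python) =====
-- def _get_next_period(last_period: str, increment: int, period_type: str) -> str: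
--     """Closed-form month arithmetic instead of A's step-by-step loop."""
--     if period_type == 'month':
--         year, month = map(int, last_period.split('-'))
--         inc = increment if increment > 0 else 0
--         total = (month - 1) + inc
--         return f"{year + total // 12}-{total % 12 + 1:02d}"
--     return f"{last_period}+{increment}"
-- ===== Notes on version B (the rewrite author's own statement) =====
-- stated objective: simpler
-- what changed: Replaced A's month-by-month loop (increment iterations) with one closed-form modular computation: total = month-1+max(increment,0), year += total//12, month = total%12+1.
-- outside the precondition, e.g. on _get_next_period('2020-13', 1, 'month'): A returns '2021-01', B returns '2021-02'
import Mathlib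
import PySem

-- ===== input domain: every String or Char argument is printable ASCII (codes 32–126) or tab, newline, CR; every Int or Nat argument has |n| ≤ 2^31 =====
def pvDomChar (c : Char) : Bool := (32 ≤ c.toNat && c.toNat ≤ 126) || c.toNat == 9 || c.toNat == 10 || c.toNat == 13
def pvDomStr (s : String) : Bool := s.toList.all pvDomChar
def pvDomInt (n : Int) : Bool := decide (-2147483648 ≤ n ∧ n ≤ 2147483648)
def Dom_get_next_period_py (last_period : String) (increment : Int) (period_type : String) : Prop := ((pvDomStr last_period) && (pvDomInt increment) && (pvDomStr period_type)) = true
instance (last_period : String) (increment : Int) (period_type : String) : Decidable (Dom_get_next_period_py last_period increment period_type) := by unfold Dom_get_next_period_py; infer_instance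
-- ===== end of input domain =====

-- B replaces A's month-by-month loop with one closed-form modular computation (objective: simpler).

-- f"{n:02d}" (width 2): pads a single nonnegative digit with one leading zero; exact for every Int
def pvFmt02 (n : Int) : String :=
  if 0 ≤ n ∧ n < 10 then "0" ++ PySem.Int.toStr n else PySem.Int.toStr n

-- ===== PORT A =====
def get_next_period_py (last_period : String) (increment : Int) (period_type : String) : String :=
  if period_type == "month" then
    match ((PySem.Str.split? last_period "-").getD []).map PySem.Int.ofStr? with
    | [some year, some month] =>
      let st := (List.range increment.toNat).foldl
        (fun (st : Int × Int) _ =>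
          let m := st.2 + 1
          if m > 12 then (st.1 + 1, (1 : Int)) else (st.1, m)) (year, month)
      PySem.Int.toStr st.1 ++ "-" ++ pvFmt02 st.2
    | _ => ""   -- Python raises here (int()/unpack ValueError); outside Pre_
  else
    last_period ++ "+" ++ PySem.Int.toStr increment

-- ===== PORT B =====
def get_next_period_py_alt (last_period : String) (increment : Int) (period_type : String) : String :=
  if period_type == "month" then
    let ps := ((PySem.Str.split? last_period "-").getD []).map PySem.Int.ofStr?
    let y? := (ps[0]?.getD none)
    let m? := (ps[1]?.getD none)
    if ps.length == 2 && y?.isSome && m?.isSome then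
      let year := y?.getD 0
      let month := m?.getD 0
      let inc := if increment > 0 then increment else 0
      let total := (month - 1) + inc
      PySem.Int.toStr (year + PySem.Int.floordiv total 12) ++ "-"
        ++ pvFmt02 (PySem.Int.mod total 12 + 1)
    else ""   -- Python raises here (int()/unpack ValueError); outside Pre_
  else
    last_period ++ "+" ++ PySem.Int.toStr increment

-- ===== PRECONDITION & SPEC =====
-- Pre_ excludes (a) 'month' inputs on which A RAISES (last_period does not split on '-' into
-- exactly two int()-parseable pieces), and (b) 'month' inputs whose parsed month lies outside
-- 1..12: there the period string is invalid and A's wrapped value and B's modular value are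
-- both defensible accidents, so neither is specified.
def Pre_get_next_period_py (last_period : String) (increment : Int) (period_type : String) : Prop :=
  period_type = "month" →
    (let ps := ((PySem.Str.split? last_period "-").getD []).map PySem.Int.ofStr?
     ps.length = 2 ∧ ps.all Option.isSome
       ∧ 1 ≤ (ps.getD 1 none).getD 0 ∧ (ps.getD 1 none).getD 0 ≤ 12)
instance (last_period : String) (increment : Int) (period_type : String) : Decidable (Pre_get_next_period_py last_period increment period_type) := by unfold Pre_get_next_period_py; infer_instance

def pvWitness_get_next_period_py : String × Int × String := ("2024-05", 3, "month")

def Spec_get_next_period_py (last_period : String) (increment : Int) (period_type : String) (out : String) : Prop := out = get_next_period_py_alt last_period increment period_type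
instance (last_period : String) (increment : Int) (period_type : String) (out : String) : Decidable (Spec_get_next_period_py last_period increment period_type out) := by unfold Spec_get_next_period_py; infer_instance

-- ===== CLAIM (what is proved, stated in full; the proofs are below) =====
def Claim_equal_get_next_period_py : Prop := ∀ (last_period : String) (increment : Int) (period_type : String), Dom_get_next_period_py last_period increment period_type → Pre_get_next_period_py last_period increment period_type → Spec_get_next_period_py last_period increment period_type (get_next_period_py last_period increment period_type)

-- ===== LEMMAS AND PROOFS =====

-- closed form of A's loop, for a start month in 1..12
theorem pv_loop_closed (y m : Int) (hm1 : 1 ≤ m) (hm2 : m ≤ 12) : ∀ (k : Nat),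
    (List.range k).foldl
      (fun (st : Int × Int) _ =>
        let m' := st.2 + 1
        if m' > 12 then (st.1 + 1, (1 : Int)) else (st.1, m')) (y, m)
    = (y + (m - 1 + k) / 12, (m - 1 + k) % 12 + 1) := by
  intro k
  induction k with
  | zero =>
      simp only [List.range_zero, List.foldl_nil, Nat.cast_zero]
      rw [Prod.mk.injEq]
      exact ⟨by omega, by omega⟩
  | succ n ih =>
      rw [List.range_succ, List.foldl_append, ih]
      simp only [List.foldl_cons, List.foldl_nil]
      push_cast
      split_ifs with h <;> rw [Prod.mk.injEq] <;> exact ⟨by omega, by omega⟩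

theorem pv_floordiv12 (t : Int) : PySem.Int.floordiv t 12 = t / 12 :=
  PySem.Int.floordiv_eq_ediv_of_pos (by norm_num)

theorem pv_mod12 (t : Int) : PySem.Int.mod t 12 = t % 12 :=
  PySem.Int.mod_eq_emod_of_pos (by norm_num)

-- ===== VERDICT (by name: the statement is the Claim_ definition above) =====
theorem get_next_period_py_spec : Claim_equal_get_next_period_py := by
  intro lp inc pt _ hpre
  unfold Spec_get_next_period_py get_next_period_py get_next_period_py_alt
  by_cases hpt : pt == "month"
  · simp only [hpt, if_true]
    have hpre' := hpre (by simpa using hpt)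
    cases hparts : ((PySem.Str.split? lp "-").getD []).map PySem.Int.ofStr? with
    | nil => simp [hparts] at hpre'
    | cons a rest =>
      cases a with
      | none => simp [hparts] at hpre'
      | some y =>
        cases rest with
        | nil => simp [hparts] at hpre'
        | cons b rest2 =>
          cases b with
          | none => simp [hparts] at hpre'
          | some m =>
            cases rest2 with
            | cons c r => simp [hparts] at hpre'
            | nil =>
              rw [hparts] at hpre'
              simp only [List.all_cons, List.all_nil, List.getD, List.length_cons,
                Option.isSome_some, List.getElem?_cons_succ,
                List.getElem?_cons_zero, Option.getD] at hpre'
              simp only []   -- iota-reduce the matches on the literal list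
              obtain ⟨-, -, hm1, hm2⟩ := hpre'
              rw [pv_loop_closed y m hm1 hm2 inc.toNat]
              have hinc : (if inc > 0 then inc else 0) = (inc.toNat : Int) := by
                split_ifs <;> omega
              rw [hinc]
              simp [pv_floordiv12, pv_mod12]
  · simp [hpt]
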